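-- pv_equiv track=rewrite | github.com/jmpaz/catalog | catalog/utils.py | detect_depth
-- ===== SOURCE A (Python) =====
-- def detect_depth(text):
--     """Assess indentation depth of a string to determine if it should be flattened."""
--     lines = text.split("\n")
--     indent_sizes = []
--     current_indent = None
--     deepest_indent = 0
--     unclosed_nests = 0
--
--     for line in lines:
--         stripped_line = line.lstrip()
--         if not stripped_line or stripped_line.startswith("#"):
--             continue  # Skip empty lines and headings
--         indent_size = len(line) - len(stripped_line)
--         if current_indent is None:
--             current_indent = indent_size
--         if indent_size > deepest_indent:
--             deepest_indent = indent_size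
--         if indent_size > current_indent:
--             unclosed_nests += 1
--         else:
--             unclosed_nests -= 1 if unclosed_nests > 0 else 0
--         indent_sizes.append(indent_size)
--         current_indent = indent_size
--
--     return unclosed_nests > (len(indent_sizes) - unclosed_nests)
-- ===== SOURCE B (Python) =====
-- def detect_depth(text):
--     """Assess indentation depth of a string to determine if it should be flattened."""
--     indents = [len(line) - len(s)
--                for line in text.split("\n")
--                if (s := line.lstrip()) and not s.startswith("#")]
--     deltas = [1 if b > a else -1 for a, b in zip(indents, indents[1:])]
--     best = acc = 0
--     for d in reversed(deltas):
--         acc += d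
--         if acc > best:
--             best = acc
--     return best > len(indents) - best
-- ===== Notes on version B (the rewrite author's own statement) =====
-- stated objective: alternative
-- what changed: B replaces A's sequential clamped-at-zero nest counter with a different algorithm: it builds the list of +1/-1 deltas between consecutive kept indent widths and computes the final counter as the maximum suffix sum of that delta list (clamped-counter = max-suffix-sum identity), scanning the deltas back-to-front.
import Mathlib
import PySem

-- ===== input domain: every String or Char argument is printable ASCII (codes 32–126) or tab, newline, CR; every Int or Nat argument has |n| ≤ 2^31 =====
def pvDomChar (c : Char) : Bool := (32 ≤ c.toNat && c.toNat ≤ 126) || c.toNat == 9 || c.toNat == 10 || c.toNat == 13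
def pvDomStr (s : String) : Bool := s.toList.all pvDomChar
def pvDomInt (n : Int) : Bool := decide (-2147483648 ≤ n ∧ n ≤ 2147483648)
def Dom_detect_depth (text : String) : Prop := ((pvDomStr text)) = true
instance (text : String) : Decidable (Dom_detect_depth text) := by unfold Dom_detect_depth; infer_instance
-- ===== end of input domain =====

-- B computes A's clamped-at-zero nest counter by a different algorithm: the maximum suffix sum of
-- the +1/-1 deltas between consecutive kept indent widths (objective: alternative).

-- shared line predicates (both Pythons strip the line and test the same condition)
def lineSkip (l : List Char) : Bool :=
  decide (PySem.Chars.lstrip l = []) || PySem.Chars.startswith (PySem.Chars.lstrip l) ['#']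

def lineIndent (l : List Char) : Int :=
  PySem.Chars.len l - PySem.Chars.len (PySem.Chars.lstrip l)

-- ===== PORT A =====
-- loop state: (indent_sizes, current_indent, deepest_indent, unclosed_nests)
def aStep (st : List Int × Option Int × Int × Int) (line : List Char) :
    List Int × Option Int × Int × Int :=
  if lineSkip line then st
  else
    let d := lineIndent line
    let cur := match st.2.1 with | none => d | some c => c
    (st.1 ++ [d], some d,
     (if d > st.2.2.1 then d else st.2.2.1),
     (if d > cur then st.2.2.2 + 1 else st.2.2.2 - (if st.2.2.2 > 0 then 1 else 0)))

def detect_depth (text : String) : Bool :=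
  let lines := PySem.Chars.splitOn text.toList ['\n']
  let st := lines.foldl aStep ([], none, 0, 0)
  decide (st.2.2.2 > PySem.List.len st.1 - st.2.2.2)

-- ===== PORT B =====
def keptIndent (line : List Char) : Option Int :=
  if lineSkip line then none else some (lineIndent line)

def deltaOf (a b : Int) : Int := if b > a then 1 else -1

-- state (best, acc): acc is the running suffix sum, best its maximum so far
def bStep (st : Int × Int) (d : Int) : Int × Int :=
  let acc := st.2 + d
  (if acc > st.1 then acc else st.1, acc)

def detect_depth_alt (text : String) : Bool :=
  let indents := (PySem.Chars.splitOn text.toList ['\n']).filterMap keptIndent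
  let deltas := List.zipWith deltaOf indents indents.tail
  let st := deltas.reverse.foldl bStep (0, 0)
  decide (st.1 > PySem.List.len indents - st.1)

-- ===== PRECONDITION & SPEC =====
def Spec_detect_depth (text : String) (out : Bool) : Prop := out = detect_depth_alt text
instance (text : String) (out : Bool) : Decidable (Spec_detect_depth text out) := by unfold Spec_detect_depth; infer_instance

-- ===== CLAIM (what is proved, stated in full; the proofs are below) =====
def Claim_equal_detect_depth : Prop := ∀ (text : String), Dom_detect_depth text → Spec_detect_depth text (detect_depth text)

-- ===== LEMMAS AND PROOFS =====

-- proof-side description of A's counter: a clamped fold carrying the previous kept indent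
def cStep (st : Int × Option Int) (d : Int) : Int × Option Int :=
  match st.2 with
  | some p => if d > p then (st.1 + 1, some d)
              else if st.1 > 0 then (st.1 - 1, some d) else (st.1, some d)
  | none => (st.1, some d)

-- clamped counter over a delta list
def clampC : Int → List Int → Int
  | c, [] => c
  | c, d :: l => clampC (max 0 (c + d)) l

-- maximum suffix sum (empty suffix included)
def maxSuf : List Int → Int
  | [] => 0
  | d :: l => max (maxSuf l) (d + l.sum)

theorem cStep_some (u p d : Int) :
    cStep (u, some p) d = (if d > p then u + 1 else u - (if u > 0 then 1 else 0), some d) := by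
  unfold cStep
  split_ifs with h1 h2 <;> simp <;> omega

theorem cStep_none (u d : Int) : cStep (u, none) d = (u, some d) := rfl

theorem loop_some : ∀ (lines : List (List Char)) (sizes : List Int) (p deep u : Int),
    (lines.foldl aStep (sizes, some p, deep, u)).1.length
      = sizes.length + (lines.filterMap keptIndent).length ∧
    (lines.foldl aStep (sizes, some p, deep, u)).2.2.2
      = ((lines.filterMap keptIndent).foldl cStep (u, some p)).1 := by
  intro lines
  induction lines with
  | nil => intro sizes p deep u; simp
  | cons l ls ih =>
    intro sizes p deep u
    rw [List.foldl_cons, List.filterMap_cons]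
    by_cases h : lineSkip l = true
    · simp only [aStep, keptIndent, h, if_true]
      exact ih sizes p deep u
    · have hk : keptIndent l = some (lineIndent l) := by simp [keptIndent, h]
      rw [hk]
      simp only [aStep, h, if_false, Bool.false_eq_true, List.foldl_cons,
        List.length_cons, cStep_some]
      have := ih (sizes ++ [lineIndent l]) (lineIndent l)
        (if lineIndent l > deep then lineIndent l else deep)
        (if lineIndent l > p then u + 1 else u - (if u > 0 then 1 else 0))
      refine ⟨?_, this.2⟩
      rw [this.1]; simp; omega

theorem loop_none : ∀ (lines : List (List Char)) (sizes : List Int) (deep : Int),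
    (lines.foldl aStep (sizes, none, deep, 0)).1.length
      = sizes.length + (lines.filterMap keptIndent).length ∧
    (lines.foldl aStep (sizes, none, deep, 0)).2.2.2
      = ((lines.filterMap keptIndent).foldl cStep (0, none)).1 := by
  intro lines
  induction lines with
  | nil => intro sizes deep; simp
  | cons l ls ih =>
    intro sizes deep
    rw [List.foldl_cons, List.filterMap_cons]
    by_cases h : lineSkip l = true
    · simp only [aStep, keptIndent, h, if_true]
      exact ih sizes deep
    · have hk : keptIndent l = some (lineIndent l) := by simp [keptIndent, h]
      rw [hk]
      simp only [aStep, h, if_false, Bool.false_eq_true, List.foldl_cons,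
        List.length_cons, cStep_none]
      have := loop_some ls (sizes ++ [lineIndent l]) (lineIndent l)
        (if lineIndent l > deep then lineIndent l else deep) 0
      have e0 : (if lineIndent l > lineIndent l then (0:Int) + 1
                 else 0 - (if (0:Int) > 0 then 1 else 0)) = 0 := by simp
      rw [e0] at *
      refine ⟨?_, this.2⟩
      rw [this.1]; simp; omega

-- the clamped fold with previous-indent state equals the clamped counter over the delta list
theorem cfold_eq_clampC : ∀ (ds : List Int) (p u : Int), 0 ≤ u →
    (ds.foldl cStep (u, some p)).1 = clampC u (List.zipWith deltaOf (p :: ds) ds) := by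
  intro ds
  induction ds with
  | nil => intro p u _; simp [clampC]
  | cons d ds ih =>
    intro p u hu
    rw [List.foldl_cons, cStep_some]
    have hz : List.zipWith deltaOf (p :: d :: ds) (d :: ds)
        = deltaOf p d :: List.zipWith deltaOf (d :: ds) ds := rfl
    rw [hz]
    have hstep : (if d > p then u + 1 else u - (if u > 0 then 1 else 0))
        = max 0 (u + deltaOf p d) := by
      unfold deltaOf; split_ifs <;> omega
    rw [hstep, clampC]
    exact ih d _ (by omega)

theorem sum_le_maxSuf : ∀ (l : List Int), l.sum ≤ maxSuf l := by
  intro l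
  induction l with
  | nil => simp [maxSuf]
  | cons d l ih => simp only [maxSuf, List.sum_cons]; omega

theorem clampC_eq : ∀ (l : List Int) (c : Int), 0 ≤ c →
    clampC c l = max (maxSuf l) (c + l.sum) := by
  intro l
  induction l with
  | nil => intro c hc; simp [clampC, maxSuf]; omega
  | cons d l ih =>
    intro c hc
    rw [clampC, ih _ (by omega)]
    have := sum_le_maxSuf l
    simp only [maxSuf, List.sum_cons]
    omega

-- B's backward scan computes (maxSuf, sum)
theorem rev_fold : ∀ (l : List Int),
    l.reverse.foldl bStep (0, 0) = (maxSuf l, l.sum) := by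
  intro l
  induction l with
  | nil => simp [maxSuf]
  | cons d l ih =>
    rw [List.reverse_cons, List.foldl_append, ih]
    simp only [List.foldl_cons, List.foldl_nil, bStep, maxSuf, List.sum_cons]
    rw [Prod.mk.injEq]
    refine ⟨?_, by omega⟩
    split_ifs <;> omega

-- the two counters agree over any kept-indent list
theorem counters_eq (ind : List Int) :
    (ind.foldl cStep (0, none)).1
      = ((List.zipWith deltaOf ind ind.tail).reverse.foldl bStep (0, 0)).1 := by
  cases ind with
  | nil => simp
  | cons d0 rest =>
    rw [List.foldl_cons, cStep_none, rev_fold]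
    have h1 := cfold_eq_clampC rest d0 0 (by omega)
    have h2 := clampC_eq (List.zipWith deltaOf (d0 :: rest) rest) 0 (by omega)
    have h3 := sum_le_maxSuf (List.zipWith deltaOf (d0 :: rest) rest)
    simp only [List.tail_cons]
    omega

-- ===== VERDICT (by name: the statement is the Claim_ definition above) =====
theorem detect_depth_spec : Claim_equal_detect_depth := by
  intro text _
  unfold Spec_detect_depth detect_depth detect_depth_alt
  have h := loop_none (PySem.Chars.splitOn text.toList ['\n']) [] 0
  have hc := counters_eq ((PySem.Chars.splitOn text.toList ['\n']).filterMap keptIndent)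
  simp only [PySem.List.len_eq, h.1, h.2, hc, List.length_nil, Nat.zero_add]
  rfl
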